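-- pv_equiv track=rewrite | github.com/zikovvv/poker | get_hand_history/bitwise.py | straights_algo
-- ===== SOURCE A (Python) =====
-- def straights_algo(bbb) :
--     powers = bbb[0] | bbb[1] | bbb[2] | bbb[3]
--     straight_power = 0
--     counter = 0
--     for i in range(2, powers.bit_length() - 1) :
--         counter += 1 if (powers >> i) & 1 else -counter
--         if counter >= 4 :
--             straight_power = i
--     if straight_power == 0 :
--         return 1
--     else :
--         return straight_power - 4
-- ===== SOURCE B (Python) =====
-- def straights_algo(bbb):
--     powers = bbb[0] | bbb[1] | bbb[2] | bbb[3]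
--     m = powers & (powers >> 1) & (powers >> 2) & (powers >> 3)
--     hi = powers.bit_length() - 4
--     if hi > 2:
--         m &= (1 << hi) - 4
--     else:
--         m = 0
--     return m.bit_length() - 2 if m else 1
-- ===== Notes on version B (the rewrite author's own statement) =====
-- stated objective: alternative
-- what changed: Replaced the per-bit loop that counts runs of consecutive set bits with a closed-form bitwise detection: AND the mask with three shifted copies of itself, window the result to the original loop's index range, and read the answer off its bit_length.
import Mathlib
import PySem

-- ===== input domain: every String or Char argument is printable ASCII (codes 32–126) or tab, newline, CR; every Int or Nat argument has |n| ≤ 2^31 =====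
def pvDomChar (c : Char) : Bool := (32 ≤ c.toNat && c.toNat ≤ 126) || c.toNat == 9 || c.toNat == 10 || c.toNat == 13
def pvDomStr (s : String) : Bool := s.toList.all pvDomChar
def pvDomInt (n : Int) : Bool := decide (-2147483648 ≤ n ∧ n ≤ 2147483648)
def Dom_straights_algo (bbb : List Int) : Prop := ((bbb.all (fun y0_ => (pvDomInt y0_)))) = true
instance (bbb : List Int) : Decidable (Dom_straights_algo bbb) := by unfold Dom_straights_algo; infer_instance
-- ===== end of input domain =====

-- B replaces A's per-bit run-counting loop by a closed-form bitwise detection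
-- (AND of three shifted copies of the mask, then bit_length of the windowed result); objective: alternative.

-- ===== PORT A =====
-- A's loop after `powers` is computed, verbatim: state (straight_power, counter),
-- i ranges over range(2, powers.bit_length() - 1); i ≥ 2 in the range, so `i.toNat` is exact for `powers >> i`.
def straightsLoopA (powers : Int) : Int :=
  let st := (PySem.List.pyRange 2 ((PySem.Int.bitLength powers : Int) - 1)).foldl
    (fun (st : Int × Int) (i : Int) =>
      let counter := st.2 + (if PySem.Int.band (powers >>> i.toNat) 1 ≠ 0 then 1 else -st.2)
      let sp := if 4 ≤ counter then i else st.1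
      (sp, counter))
    (0, 0)
  if st.1 = 0 then 1 else st.1 - 4

def straights_algo (bbb : List Int) : Int :=
  match PySem.List.pyGet? bbb 0, PySem.List.pyGet? bbb 1,
        PySem.List.pyGet? bbb 2, PySem.List.pyGet? bbb 3 with
  | some b0, some b1, some b2, some b3 =>
      straightsLoopA (PySem.Int.bor (PySem.Int.bor (PySem.Int.bor b0 b1) b2) b3)
  | _, _, _, _ => 0  -- IndexError in Python; excluded by Pre_

-- ===== PORT B =====
-- Source B's closed-form core: m = powers & powers>>1 & powers>>2 & powers>>3, windowed to bits [2, hi).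
def straightsMaskB (powers : Int) : Int :=
  let m := PySem.Int.band (PySem.Int.band (PySem.Int.band powers (powers >>> (1:Nat))) (powers >>> (2:Nat))) (powers >>> (3:Nat))
  let hi : Int := (PySem.Int.bitLength powers : Int) - 4
  if 2 < hi then PySem.Int.band m ((1 <<< hi.toNat) - 4) else 0

def straights_algo_alt (bbb : List Int) : Int :=
  match PySem.List.pyGet? bbb 0 with
  | none => 0  -- IndexError in Python; excluded by Pre_
  | some b0 =>
    match PySem.List.pyGet? bbb 1 with
    | none => 0
    | some b1 =>
      match PySem.List.pyGet? bbb 2 with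
      | none => 0
      | some b2 =>
        match PySem.List.pyGet? bbb 3 with
        | none => 0
        | some b3 =>
          let m := straightsMaskB (PySem.Int.bor (PySem.Int.bor (PySem.Int.bor b0 b1) b2) b3)
          if m ≠ 0 then (PySem.Int.bitLength m : Int) - 2 else 1

-- ===== PRECONDITION & SPEC =====
-- Python raises IndexError when the list has fewer than 4 entries (both A and B index bbb[0..3]).
def Pre_straights_algo (bbb : List Int) : Prop := 4 ≤ bbb.length
instance (bbb : List Int) : Decidable (Pre_straights_algo bbb) := by unfold Pre_straights_algo; infer_instance

def pvWitness_straights_algo : List Int := [124, 0, 0, 0]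

def Spec_straights_algo (bbb : List Int) (out : Int) : Prop := out = straights_algo_alt bbb
instance (bbb : List Int) (out : Int) : Decidable (Spec_straights_algo bbb out) := by unfold Spec_straights_algo; infer_instance

-- ===== CLAIM (what is proved, stated in full; the proofs are below) =====
def Claim_equal_straights_algo : Prop := ∀ (bbb : List Int), Dom_straights_algo bbb → Pre_straights_algo bbb → Spec_straights_algo bbb (straights_algo bbb)

-- ===== LEMMAS AND PROOFS =====

-- Nat bit arithmetic: (m &&& n) + (m.ldiff n) = m.
theorem pv_and_add_ldiff (m : Nat) : ∀ n : Nat, (m &&& n) + m.ldiff n = m := by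
  induction m using Nat.binaryRec with
  | zero => intro n; simp [Nat.zero_and, Nat.ldiff]
  | bit b m ih =>
      intro n
      rw [← Nat.bit_testBit_zero_shiftRight_one n, Nat.land_bit, Nat.ldiff_bit]
      have hbit : ∀ (c : Bool) (x : Nat), Nat.bit c x = 2 * x + c.toNat := by
        intro c x; cases c <;> simp [Nat.bit]
      rw [hbit, hbit, hbit]
      have := ih (n >>> 1)
      cases b <;> cases n.testBit 0 <;> simp <;> omega

-- PySem.Int.band is Mathlib's Int.land.
theorem pv_band_eq_land (a b : Int) : PySem.Int.band a b = Int.land a b := by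
  have hofNat : ∀ m : Nat, (Int.ofNat m).toNat = m := fun m => rfl
  have hpos : ∀ m : Nat, (0:Int) ≤ Int.ofNat m := fun m => Int.natCast_nonneg m
  have hneg : ∀ m : Nat, ¬ (0:Int) ≤ Int.negSucc m := fun m => by
    simp [Int.negSucc_eq]; omega
  have hsub : ∀ m : Nat, (-(Int.negSucc m) - 1).toNat = m := fun m => by
    simp [Int.negSucc_eq]
  cases a with
  | ofNat m =>
      cases b with
      | ofNat n =>
          rw [PySem.Int.band, if_pos (hpos m), if_pos (hpos n), hofNat, hofNat]
          rfl
      | negSucc n =>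
          rw [PySem.Int.band, if_pos (hpos m), if_neg (hneg n), hofNat, hsub]
          show _ = Int.ofNat (m.ldiff n)
          have := pv_and_add_ldiff m n
          congr 1
          omega
  | negSucc m =>
      cases b with
      | ofNat n =>
          rw [PySem.Int.band, if_neg (hneg m), if_pos (hpos n), hofNat, hsub]
          show _ = Int.ofNat (n.ldiff m)
          have := pv_and_add_ldiff n m
          congr 1
          omega
      | negSucc n =>
          rw [PySem.Int.band, if_neg (hneg m), if_neg (hneg n), hsub, hsub]
          show _ = Int.negSucc (m ||| n)
          simp [Int.negSucc_eq]
          omega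

theorem pv_band_testBit (a b : Int) (i : Nat) :
    (PySem.Int.band a b).testBit i = (a.testBit i && b.testBit i) := by
  rw [pv_band_eq_land, Int.testBit_land]

-- Python `>>` on Int: testBit of the shift.
theorem pv_shiftRight_testBit (p : Int) (k i : Nat) :
    (p >>> k).testBit i = p.testBit (k + i) := by
  cases p with
  | ofNat m =>
      show (Int.ofNat (m >>> k)).testBit i = _
      simp [Int.testBit, Nat.testBit_shiftRight]
  | negSucc m =>
      show (Int.negSucc (m >>> k)).testBit i = _
      simp [Int.testBit, Nat.testBit_shiftRight]

-- truthiness of `(powers >> i) & 1`.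
theorem pv_band_one_ne_zero (x : Int) : (PySem.Int.band x 1 ≠ 0) ↔ x.testBit 0 = true := by
  cases x with
  | ofNat m =>
      have : PySem.Int.band (Int.ofNat m) 1 = Int.ofNat (m &&& 1) := by
        simp [PySem.Int.band, Int.toNat]
      rw [this]
      have := Nat.and_one_is_mod m
      simp [Int.testBit, Nat.testBit_zero, this]
      omega
  | negSucc m =>
      rw [pv_band_eq_land]
      have : Int.land (Int.negSucc m) 1 = Int.ofNat (Nat.ldiff 1 m) := by
        show Int.land (Int.negSucc m) (Int.ofNat 1) = _
        simp [Int.land]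
      rw [this]
      have h1 : Nat.ldiff 1 m = 1 - (1 &&& m) := by
        have := pv_and_add_ldiff 1 m
        omega
      have h2 : 1 &&& m = m &&& 1 := Nat.and_comm 1 m
      have h3 := Nat.and_one_is_mod m
      simp [Int.testBit, Nat.testBit_zero, h1, h2, h3]
      omega

theorem pv_bit_iff (p : Int) (i : Nat) :
    (PySem.Int.band (p >>> i) 1 ≠ 0) ↔ p.testBit i = true := by
  rw [pv_band_one_ne_zero, pv_shiftRight_testBit]
  norm_num

-- ----- A-side loop characterisation -----

-- the counter after the loop has processed indices 2,…,M-1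
def pvRun (p : Int) : Nat → Nat
  | 0 => 0
  | m + 1 => if m < 2 then 0 else if p.testBit m then pvRun p m + 1 else 0

-- the straight_power after the loop has processed indices 2,…,M-1
def pvSp (p : Int) : Nat → Nat
  | 0 => 0
  | m + 1 => if 4 ≤ pvRun p (m + 1) then m else pvSp p m

theorem pv_foldA (p : Int) (M : Nat) :
    (PySem.List.pyRange 2 (M : Int)).foldl
      (fun (st : Int × Int) (i : Int) =>
        let counter := st.2 + (if PySem.Int.band (p >>> i.toNat) 1 ≠ 0 then 1 else -st.2)
        let sp := if 4 ≤ counter then i else st.1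
        (sp, counter)) (0, 0)
    = ((pvSp p M : Int), (pvRun p M : Int)) := by
  induction M with
  | zero =>
      have h : PySem.List.pyRange 2 ((0:Nat) : Int) = [] := by
        simp [PySem.List.pyRange]
      rw [h]
      simp [pvSp, pvRun]
  | succ m ih =>
      by_cases hm : m < 2
      · interval_cases m
        · have h : PySem.List.pyRange 2 ((1:Nat) : Int) = [] := by
            simp [PySem.List.pyRange]
          rw [h]; simp [pvSp, pvRun]
        · have h : PySem.List.pyRange 2 ((2:Nat) : Int) = [] := by
            simp [PySem.List.pyRange]
          rw [h]; simp [pvSp, pvRun]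
      · have h2 : (2:Int) ≤ (m : Int) := by exact_mod_cast Nat.le_of_not_lt hm
        have hcast : ((m + 1 : Nat) : Int) = (m : Int) + 1 := by push_cast; ring
        rw [hcast, PySem.List.pyRange_one_succ_right h2, List.foldl_append, ih]
        simp only [List.foldl]
        have htn : ((m : Int)).toNat = m := Int.toNat_natCast m
        rw [htn]
        have hrun : pvRun p (m + 1) = if p.testBit m then pvRun p m + 1 else 0 := by
          rw [pvRun, if_neg hm]
        by_cases hbit : p.testBit m
        · rw [if_pos hbit] at hrun
          have hc : ((pvRun p m : Int) + (if PySem.Int.band (p >>> m) 1 ≠ 0 then 1 else -(pvRun p m : Int)))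
              = ((pvRun p (m+1) : Int)) := by
            rw [if_pos ((pv_bit_iff p m).mpr hbit), hrun]; push_cast; ring
          rw [hc]
          have hiff : ((4:Int) ≤ (pvRun p (m+1) : Int)) ↔ 4 ≤ pvRun p (m+1) := by exact_mod_cast Iff.rfl
          by_cases h4 : 4 ≤ pvRun p (m+1)
          · rw [if_pos (hiff.mpr h4)]
            rw [pvSp, if_pos h4]
          · rw [if_neg (fun hh => h4 (hiff.mp hh))]
            rw [pvSp, if_neg h4]
        · rw [if_neg hbit] at hrun
          have hcond : ¬ (PySem.Int.band (p >>> m) 1 ≠ 0) := by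
            intro hh; exact hbit ((pv_bit_iff p m).mp hh)
          rw [if_neg hcond]
          have hc : ((pvRun p m : Int) + -(pvRun p m : Int)) = ((pvRun p (m+1) : Int)) := by
            rw [hrun]; push_cast; ring
          rw [hc, hrun]
          have h4 : ¬ ((4:Int) ≤ ((0:Nat) : Int)) := by norm_num
          rw [if_neg h4]
          rw [pvSp, if_neg (by rw [hrun]; omega)]

-- 1 ≤ k: the counter reaches k exactly when the k bits below m are set (inside the window starting at 2)
theorem pv_run_ge (p : Int) : ∀ (m k : Nat), 1 ≤ k →
    (k ≤ pvRun p m ↔ (k + 2 ≤ m ∧ ∀ t, m - k ≤ t → t < m → p.testBit t = true)) := by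
  intro m
  induction m with
  | zero =>
      intro k hk
      simp [pvRun]
      omega
  | succ m ih =>
      intro k hk
      by_cases hm : m < 2
      · have h0 : pvRun p (m + 1) = 0 := by rw [pvRun, if_pos hm]
        rw [h0]
        constructor
        · omega
        · rintro ⟨h1, -⟩; omega
      · rw [pvRun, if_neg hm]
        by_cases hbit : p.testBit m
        · rw [if_pos hbit]
          rcases Nat.lt_or_ge 1 k with hk2 | hk1
          · -- 2 ≤ k
            have hih := ih (k - 1) (by omega)
            constructor
            · intro h
              have : k - 1 ≤ pvRun p m := by omega
              obtain ⟨hA, hB⟩ := hih.mp this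
              refine ⟨by omega, ?_⟩
              intro t ht1 ht2
              rcases Nat.lt_or_ge t m with htm | htm
              · exact hB t (by omega) htm
              · have : t = m := by omega
                rw [this]; exact hbit
            · rintro ⟨hA, hB⟩
              have : k - 1 ≤ pvRun p m := by
                apply hih.mpr
                refine ⟨by omega, ?_⟩
                intro t ht1 ht2
                exact hB t (by omega) (by omega)
              omega
          · -- k = 1
            have hk1' : k = 1 := by omega
            subst hk1'
            constructor
            · intro _
              refine ⟨by omega, ?_⟩
              intro t ht1 ht2
              have : t = m := by omega
              rw [this]; exact hbit
            · intro _; omega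
        · rw [if_neg hbit]
          constructor
          · intro h; omega
          · rintro ⟨h1, h2⟩
            have := h2 m (by omega) (by omega)
            rw [this] at hbit
            exact absurd rfl hbit

def pvGood (p : Int) (m : Nat) : Prop :=
  5 ≤ m ∧ p.testBit m = true ∧ p.testBit (m-1) = true ∧ p.testBit (m-2) = true ∧ p.testBit (m-3) = true

theorem pv_cond_iff (p : Int) (m : Nat) : 4 ≤ pvRun p (m + 1) ↔ pvGood p m := by
  rw [pv_run_ge p (m + 1) 4 (by omega)]
  unfold pvGood
  constructor
  · rintro ⟨h1, h2⟩
    exact ⟨by omega, h2 m (by omega) (by omega), h2 (m-1) (by omega) (by omega),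
           h2 (m-2) (by omega) (by omega), h2 (m-3) (by omega) (by omega)⟩
  · rintro ⟨h1, b0, b1, b2, b3⟩
    refine ⟨by omega, ?_⟩
    intro t ht1 ht2
    have : t = m ∨ t = m - 1 ∨ t = m - 2 ∨ t = m - 3 := by omega
    rcases this with h | h | h | h <;> rw [h] <;> assumption

theorem pv_sp_sound (p : Int) (M : Nat) :
    pvSp p M = 0 ∨ (pvGood p (pvSp p M) ∧ pvSp p M < M) := by
  induction M with
  | zero => left; rfl
  | succ M ih =>
      rw [pvSp]
      by_cases h : 4 ≤ pvRun p (M + 1)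
      · rw [if_pos h]
        right
        exact ⟨(pv_cond_iff p M).mp h, by omega⟩
      · rw [if_neg h]
        rcases ih with h0 | ⟨hg, hlt⟩
        · left; exact h0
        · right; exact ⟨hg, by omega⟩

theorem pv_sp_ge (p : Int) (M m : Nat) (h : pvGood p m) (hm : m < M) : m ≤ pvSp p M := by
  induction M with
  | zero => omega
  | succ M ih =>
      rw [pvSp]
      by_cases hc : 4 ≤ pvRun p (M + 1)
      · rw [if_pos hc]
        omega
      · rw [if_neg hc]
        rcases Nat.lt_or_ge m M with hlt | hge
        · exact ih hlt
        · have : m = M := by omega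
          subst this
          exact absurd ((pv_cond_iff p m).mpr h) hc

-- ----- B-side mask characterisation -----

theorem pv_mask_eq (hi : Nat) (h3 : 3 ≤ hi) : ((1 <<< hi : Nat) : Int) - 4 = Int.ofNat (2 ^ hi - 4) := by
  have h2 : (1 <<< hi : Nat) = 2 ^ hi := Nat.one_shiftLeft hi
  have h8 : 8 ≤ 2 ^ hi := by
    calc (8:Nat) = 2 ^ 3 := rfl
    _ ≤ 2 ^ hi := Nat.pow_le_pow_right (by omega) h3
  rw [h2]
  simp only [Int.ofNat_eq_natCast]
  push_cast [Nat.cast_sub (by omega : 4 ≤ 2 ^ hi)]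
  ring

theorem pv_window_testBit (hi : Nat) (h3 : 3 ≤ hi) (j : Nat) :
    (2 ^ hi - 4 : Nat).testBit j = (decide (2 ≤ j) && decide (j < hi)) := by
  have hdecomp : (2 ^ hi - 4 : Nat) = (2 ^ (hi - 2) - 1) <<< 2 := by
    rw [Nat.shiftLeft_eq]
    have : 2 ^ hi = 2 ^ (hi - 2) * 2 ^ 2 := by
      rw [← pow_add]
      congr 1
      omega
    have h1 : 1 ≤ 2 ^ (hi - 2) := Nat.one_le_two_pow
    omega
  rw [hdecomp, Nat.testBit_shiftLeft, Nat.testBit_two_pow_sub_one]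
  by_cases hj2 : 2 ≤ j
  · simp [ge_iff_le, hj2, show (j - 2 < hi - 2) ↔ (j < hi) by omega]
  · simp [ge_iff_le, hj2]

theorem pv_mask_testBit (p : Int) (hi : Nat) (h3 : 3 ≤ hi) (j : Nat) :
    (PySem.Int.band
      (PySem.Int.band (PySem.Int.band (PySem.Int.band p (p >>> (1:Nat))) (p >>> (2:Nat))) (p >>> (3:Nat)))
      (((1 <<< hi : Nat) : Int) - 4)).testBit j
    = ((((p.testBit j && p.testBit (j+1)) && p.testBit (j+2)) && p.testBit (j+3))
        && (decide (2 ≤ j) && decide (j < hi))) := by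
  rw [pv_mask_eq hi h3]
  rw [pv_band_testBit, pv_band_testBit, pv_band_testBit, pv_band_testBit]
  rw [pv_shiftRight_testBit, pv_shiftRight_testBit, pv_shiftRight_testBit]
  have hw : (Int.ofNat (2 ^ hi - 4)).testBit j = (2 ^ hi - 4 : Nat).testBit j := rfl
  rw [hw, pv_window_testBit hi h3 j, show 1 + j = j + 1 from by omega,
    show 2 + j = j + 2 from by omega, show 3 + j = j + 3 from by omega]

-- ----- glue -----

theorem pv_A_eq (p : Int) : straightsLoopA p =
    (if (pvSp p (PySem.Int.bitLength p - 1) : Int) = 0 then 1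
     else (pvSp p (PySem.Int.bitLength p - 1) : Int) - 4) := by
  unfold straightsLoopA
  rcases Nat.eq_zero_or_pos (PySem.Int.bitLength p) with h0 | hpos
  · rw [h0]
    have hemp : PySem.List.pyRange 2 (((0:Nat) : Int) - 1) = [] := by
      simp [PySem.List.pyRange]
    rw [hemp]
    simp [pvSp]
  · have hc : ((PySem.Int.bitLength p : Nat) : Int) - 1 = ((PySem.Int.bitLength p - 1 : Nat) : Int) := by
      omega
    rw [hc, pv_foldA]

theorem pv_core (p : Int) :
    straightsLoopA p = (let m := straightsMaskB p;
      if m ≠ 0 then (PySem.Int.bitLength m : Int) - 2 else 1) := by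
  show straightsLoopA p =
    (if straightsMaskB p ≠ 0 then (PySem.Int.bitLength (straightsMaskB p) : Int) - 2 else 1)
  rw [pv_A_eq]
  by_cases h7 : 7 ≤ PySem.Int.bitLength p
  · -- n ≥ 7: the window is non-empty
    have h3 : 3 ≤ PySem.Int.bitLength p - 4 := by omega
    have hcond : (2:Int) < (PySem.Int.bitLength p : Int) - 4 := by omega
    have hmask : straightsMaskB p =
        PySem.Int.band
          (PySem.Int.band (PySem.Int.band (PySem.Int.band p (p >>> (1:Nat))) (p >>> (2:Nat))) (p >>> (3:Nat)))
          (((1 <<< (PySem.Int.bitLength p - 4) : Nat) : Int) - 4) := by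
      show (if (2:Int) < (PySem.Int.bitLength p : Int) - 4 then _ else (0:Int)) = _
      rw [if_pos hcond,
        show ((PySem.Int.bitLength p : Int) - 4).toNat = PySem.Int.bitLength p - 4 from by omega]
    have hnonneg : 0 ≤ straightsMaskB p := by
      rw [hmask, PySem.Int.band_comm, pv_mask_eq _ h3]
      exact PySem.Int.band_nonneg_of_nonneg_left _ (Int.natCast_nonneg _)
    set k : Nat := (straightsMaskB p).toNat with hkdef
    have hk : straightsMaskB p = (k : Int) := (Int.toNat_of_nonneg hnonneg).symm
    have htb : ∀ j : Nat, k.testBit j =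
        ((((p.testBit j && p.testBit (j+1)) && p.testBit (j+2)) && p.testBit (j+3))
          && (decide (2 ≤ j) && decide (j < PySem.Int.bitLength p - 4))) := by
      intro j
      have h := pv_mask_testBit p (PySem.Int.bitLength p - 4) h3 j
      rw [← hmask, hk] at h
      exact h
    by_cases hk0 : k = 0
    · -- no straight: both return 1
      have hz : straightsMaskB p = 0 := by rw [hk, hk0]; rfl
      rw [hz]
      simp only [ne_eq, not_true_eq_false, if_false]
      have hsp : pvSp p (PySem.Int.bitLength p - 1) = 0 := by
        rcases pv_sp_sound p (PySem.Int.bitLength p - 1) with h0 | ⟨hg, hlt⟩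
        · exact h0
        · exfalso
          obtain ⟨hg5, b0, b1, b2, b3⟩ := hg
          have := htb (pvSp p (PySem.Int.bitLength p - 1) - 3)
          rw [hk0, Nat.zero_testBit] at this
          rw [show pvSp p (PySem.Int.bitLength p - 1) - 3 + 1 = pvSp p (PySem.Int.bitLength p - 1) - 2 from by omega,
              show pvSp p (PySem.Int.bitLength p - 1) - 3 + 2 = pvSp p (PySem.Int.bitLength p - 1) - 1 from by omega,
              show pvSp p (PySem.Int.bitLength p - 1) - 3 + 3 = pvSp p (PySem.Int.bitLength p - 1) from by omega,
              b0, b1, b2, b3] at this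
          simp only [Bool.true_and] at this
          rw [decide_eq_true (by omega : 2 ≤ pvSp p (PySem.Int.bitLength p - 1) - 3),
              decide_eq_true (by omega : pvSp p (PySem.Int.bitLength p - 1) - 3 < PySem.Int.bitLength p - 4)] at this
          simp at this
      rw [hsp]
      norm_num
    · -- a straight exists: top set bit of the mask gives the answer
      have hkpos : 0 < k := Nat.pos_of_ne_zero hk0
      have hne : straightsMaskB p ≠ 0 := by
        rw [hk]; exact_mod_cast hk0
      rw [if_pos hne, hk]
      have hlt : k < 2 ^ PySem.Int.bitLength (k : Int) := by
        have := PySem.Int.lt_two_pow_bitLength (k : Int)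
        simpa using this
      have hL1 : 1 ≤ PySem.Int.bitLength (k : Int) := by
        by_contra hc
        have : PySem.Int.bitLength (k : Int) = 0 := by omega
        rw [this] at hlt
        omega
      set L : Nat := PySem.Int.bitLength (k : Int) with hLdef
      have hge : 2 ^ (L - 1) ≤ k := by
        have := PySem.Int.two_pow_bitLength_le (k : Int) (by exact_mod_cast hk0)
        simpa using this
      have htop : k.testBit (L - 1) = true :=
        Nat.testBit_of_two_pow_le_and_two_pow_add_one_gt hge
          (by rw [show L - 1 + 1 = L from by omega]; exact hlt)
      -- read off the window facts at the top bit
      have hb := htb (L - 1)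
      rw [htop] at hb
      have hb' := hb.symm
      simp only [Bool.and_eq_true, decide_eq_true_eq] at hb'
      obtain ⟨⟨⟨⟨c0, c1⟩, c2⟩, c3⟩, hj2, hjh⟩ := hb'
      have hgood : pvGood p (L - 1 + 3) := by
        refine ⟨by omega, ?_, ?_, ?_, ?_⟩
        · rw [show L - 1 + 3 = (L - 1) + 3 from rfl]; exact c3
        · rw [show L - 1 + 3 - 1 = (L - 1) + 2 from by omega]; exact c2
        · rw [show L - 1 + 3 - 2 = (L - 1) + 1 from by omega]; exact c1
        · rw [show L - 1 + 3 - 3 = L - 1 from by omega]; exact c0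
      have hge' : L - 1 + 3 ≤ pvSp p (PySem.Int.bitLength p - 1) :=
        pv_sp_ge p _ _ hgood (by omega)
      have hle' : pvSp p (PySem.Int.bitLength p - 1) ≤ L - 1 + 3 := by
        rcases pv_sp_sound p (PySem.Int.bitLength p - 1) with h0 | ⟨hg, hlt2⟩
        · omega
        · by_contra hgt
          obtain ⟨hg5, b0, b1, b2, b3⟩ := hg
          set s : Nat := pvSp p (PySem.Int.bitLength p - 1) with hsdef
          have hfalse : k.testBit (s - 3) = false :=
            Nat.testBit_eq_false_of_lt
              (lt_of_lt_of_le hlt (Nat.pow_le_pow_right (by omega) (by omega)))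
          have := htb (s - 3)
          rw [hfalse,
              show s - 3 + 1 = s - 2 from by omega,
              show s - 3 + 2 = s - 1 from by omega,
              show s - 3 + 3 = s from by omega,
              b0, b1, b2, b3] at this
          simp only [Bool.true_and] at this
          rw [decide_eq_true (by omega : 2 ≤ s - 3),
              decide_eq_true (by omega : s - 3 < PySem.Int.bitLength p - 4)] at this
          simp at this
      have hsp : pvSp p (PySem.Int.bitLength p - 1) = L - 1 + 3 := by omega
      rw [hsp]
      rw [if_neg (by push_cast; omega)]
      push_cast
      omega
  · -- n ≤ 6: the range has no index with counter ≥ 4; both return 1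
    have hz : straightsMaskB p = 0 := by
      show (if (2:Int) < (PySem.Int.bitLength p : Int) - 4 then _ else (0:Int)) = 0
      rw [if_neg (by omega)]
    rw [hz]
    simp only [ne_eq, not_true_eq_false, if_false]
    have hsp : pvSp p (PySem.Int.bitLength p - 1) = 0 := by
      rcases pv_sp_sound p (PySem.Int.bitLength p - 1) with h0 | ⟨⟨hg5, -⟩, hlt⟩
      · exact h0
      · omega
    rw [hsp]
    norm_num

theorem pv_get4 (bbb : List Int) (h : 4 ≤ bbb.length) :
    ∃ b0 b1 b2 b3 rest, bbb = b0 :: b1 :: b2 :: b3 :: rest ∧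
      PySem.List.pyGet? bbb 0 = some b0 ∧ PySem.List.pyGet? bbb 1 = some b1 ∧
      PySem.List.pyGet? bbb 2 = some b2 ∧ PySem.List.pyGet? bbb 3 = some b3 := by
  match bbb, h with
  | b0 :: b1 :: b2 :: b3 :: rest, _ =>
    refine ⟨b0, b1, b2, b3, rest, rfl, ?_, ?_, ?_, ?_⟩ <;>
      (simp [PySem.List.pyGet?, PySem.List.pyIdx?]; rw [if_pos (by omega)]; rfl)

-- ===== VERDICT (by name: the statement is the Claim_ definition above) =====
theorem straights_algo_spec : Claim_equal_straights_algo := by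
  intro bbb _ hpre
  unfold Spec_straights_algo straights_algo straights_algo_alt
  obtain ⟨b0, b1, b2, b3, rest, rfl, h0, h1, h2, h3⟩ := pv_get4 bbb hpre
  rw [h0, h1, h2, h3]
  exact pv_core _
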